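-- pv_equiv track=rewrite | github.com/CMWelch/Python-Practice | Python/Python_Exercises/Paper Doll.py | paper_doll
-- ===== SOURCE A (Python) =====
-- def paper_doll(string):
--     new_string = ""
--
--     for letter in string:
--         if letter == " ":
--             new_string = new_string + letter
--         else:
--             new_string = new_string + letter * 3
--     return new_string
-- ===== SOURCE B (Python) =====
-- def paper_doll(string):
--     table = {ord(c): c * 3 for c in set(string) if c != ' '}
--     return string.translate(table)
-- ===== Notes on version B (the rewrite author's own statement) =====
-- stated objective: idiomatic
-- what changed: Replaces the explicit per-character loop-and-branch with a precomputed translation table (ord -> tripled char, spaces omitted) applied in one str.translate pass.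
import Mathlib
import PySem

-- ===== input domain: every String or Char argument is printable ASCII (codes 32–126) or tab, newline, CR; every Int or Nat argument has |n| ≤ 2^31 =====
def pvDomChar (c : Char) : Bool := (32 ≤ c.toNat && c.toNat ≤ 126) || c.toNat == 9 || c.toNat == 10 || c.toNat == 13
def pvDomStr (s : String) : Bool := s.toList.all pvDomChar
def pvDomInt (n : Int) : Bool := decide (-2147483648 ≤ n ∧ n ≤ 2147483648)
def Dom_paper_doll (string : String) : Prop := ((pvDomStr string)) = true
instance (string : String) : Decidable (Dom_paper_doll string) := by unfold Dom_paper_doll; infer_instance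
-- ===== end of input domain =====

-- B replaces A's per-character loop-and-branch with a precomputed translation table
-- (ord -> tripled char, spaces omitted) applied in one str.translate pass (idiomatic).

-- ===== PORT A =====
-- new_string accumulated as a List Char; 'letter * 3' is [letter, letter, letter]
def paper_doll (string : String) : String :=
  String.ofList (string.toList.foldl
    (fun new_string letter =>
      if letter = ' ' then new_string ++ [letter]
      else new_string ++ [letter, letter, letter]) [])

-- ===== PORT B =====
-- table = {ord(c): c*3 for c in set(string) if c != ' '}; the dict is only looked up
-- afterwards, so iterating the PySem.Set is exact.
def paper_doll_table (string : String) : PySem.Dict Int String :=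
  (PySem.Set.ofList string.toList).foldl
    (fun d c => if c ≠ ' ' then d.insert (c.toNat : Int) (String.ofList [c, c, c]) else d)
    PySem.Dict.empty

-- string.translate(table): each char c is replaced by table[ord(c)] if present, else kept
def paper_doll_alt (string : String) : String :=
  String.ofList (string.toList.flatMap
    (fun c => (((paper_doll_table string).get? (c.toNat : Int)).getD (String.ofList [c])).toList))

-- ===== PRECONDITION & SPEC =====
def Spec_paper_doll (string : String) (out : String) : Prop := out = paper_doll_alt string
instance (string : String) (out : String) : Decidable (Spec_paper_doll string out) := by unfold Spec_paper_doll; infer_instance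

-- ===== CLAIM (what is proved, stated in full; the proofs are below) =====
def Claim_equal_paper_doll : Prop := ∀ (string : String), Dom_paper_doll string → Spec_paper_doll string (paper_doll string)

-- ===== LEMMAS AND PROOFS =====

theorem char_toNat_inj {a b : Char} (h : a.toNat = b.toNat) : a = b := by
  apply Char.ext
  exact UInt32.toNat_inj.mp h

theorem table_get?_foldl (l : List Char) (d : PySem.Dict Int String) (x : Char) :
    (l.foldl
      (fun d c => if c ≠ ' ' then d.insert (c.toNat : Int) (String.ofList [c, c, c]) else d)
      d).get? (x.toNat : Int)
    = if x ∈ l ∧ x ≠ ' ' then some (String.ofList [x, x, x]) else d.get? (x.toNat : Int) := by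
  induction l generalizing d with
  | nil => simp
  | cons c cs ih =>
    simp only [List.foldl_cons, ih]
    by_cases hx : x ∈ cs ∧ x ≠ ' '
    · simp [List.mem_cons, hx]
    · simp only [hx, if_false]
      by_cases hxc : x = c
      · subst hxc
        by_cases hsp : x = ' '
        · simp [hsp]
        · simp only [hsp, ne_eq, not_false_iff, if_true, PySem.Dict.get?_insert_self]
          simp [List.mem_cons]
      · have hne : (x.toNat : Int) ≠ (c.toNat : Int) := by
          intro h
          exact hxc (char_toNat_inj (by exact_mod_cast h))
        have hfalse : ¬((x = c ∨ x ∈ cs) ∧ ¬x = ' ') := by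
          rintro ⟨h | h, hs⟩
          · exact hxc h
          · exact hx ⟨h, hs⟩
        by_cases hsp : c = ' '
        · simp only [hsp, List.mem_cons]
          simp only [ne_eq, not_true_eq_false, if_false]
          have : ¬((x = ' ' ∨ x ∈ cs) ∧ x ≠ ' ') := by
            rintro ⟨h | h, hs⟩
            · exact hs h
            · exact hx ⟨h, hs⟩
          simp [this]
        · simp only [hsp, ne_eq, not_false_iff, if_true,
            PySem.Dict.get?_insert_of_ne _ _ hne]
          simp [List.mem_cons, hfalse]

theorem table_get? (string : String) (x : Char) (hx : x ∈ string.toList) :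
    (paper_doll_table string).get? (x.toNat : Int)
    = if x = ' ' then none else some (String.ofList [x, x, x]) := by
  unfold paper_doll_table
  rw [table_get?_foldl]
  by_cases hsp : x = ' '
  · simp [hsp]
  · simp [hsp, PySem.Set.mem_ofList, hx]

theorem flatMap_eq (string : String) :
    string.toList.flatMap
      (fun c => (((paper_doll_table string).get? (c.toNat : Int)).getD (String.ofList [c])).toList)
    = string.toList.flatMap (fun c => if c = ' ' then [c] else [c, c, c]) := by
  apply List.flatMap_congr
  intro c hc
  rw [table_get? string c hc]
  by_cases hsp : c = ' ' <;> simp [hsp]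

theorem paper_doll_spec_aux (string : String) : paper_doll string = paper_doll_alt string := by
  unfold paper_doll paper_doll_alt
  rw [flatMap_eq]
  congr 1
  rw [PySem.List.foldl_congr_mem string.toList _
        (fun acc c => acc ++ (if c = ' ' then [c] else [c, c, c])) []
        (by intro acc c _; by_cases h : c = ' ' <;> simp [h])]
  exact PySem.List.foldl_append_eq_flatMap _ _ _

-- ===== VERDICT (by name: the statement is the Claim_ definition above) =====
theorem paper_doll_spec : Claim_equal_paper_doll := by
  intro string _
  exact paper_doll_spec_aux string
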